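-- pv_equiv track=rewrite | github.com/Yaksh-Projectkmt/OEA_AI_DEV | PROCESS_OEA_dev_1.py | get_left_bounding_box
-- ===== SOURCE A (Python) =====
-- def get_left_bounding_box(leads, labels_and_boxes, right_leads_x_min, image_height):
--     selected_boxes = [box for label, box in labels_and_boxes if label in leads]
--
--     if not selected_boxes:
--         return None
--
--     x_min = min(box[0] for box in selected_boxes)
--     y_min = max(min(box[1] for box in selected_boxes) - 110, 0)
--     x_max = right_leads_x_min - 10
--     y_max = min(max(box[3] for box in selected_boxes) + 250, image_height)
--
--     return (x_min, y_min, x_max, y_max), len(selected_boxes)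
-- ===== SOURCE B (Python) =====
-- def get_left_bounding_box(leads, labels_and_boxes, right_leads_x_min, image_height):
--     count = 0
--     x_min = min_y1 = max_y3 = None
--     for label, box in labels_and_boxes:
--         if label in leads:
--             if count == 0:
--                 x_min, min_y1, max_y3 = box[0], box[1], box[3]
--             else:
--                 x_min = min(x_min, box[0])
--                 min_y1 = min(min_y1, box[1])
--                 max_y3 = max(max_y3, box[3])
--             count += 1
--     if count == 0:
--         return None
--     return (x_min, max(min_y1 - 110, 0), right_leads_x_min - 10,
--             min(max_y3 + 250, image_height)), count
-- ===== Notes on version B (the rewrite author's own statement) =====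
-- stated objective: alternative
-- what changed: Replaced the filtered intermediate list plus four separate scans (three min/max generator passes and len) with one fused loop over labels_and_boxes maintaining running x_min, min_y1, max_y3 and a count.
import Mathlib
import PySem

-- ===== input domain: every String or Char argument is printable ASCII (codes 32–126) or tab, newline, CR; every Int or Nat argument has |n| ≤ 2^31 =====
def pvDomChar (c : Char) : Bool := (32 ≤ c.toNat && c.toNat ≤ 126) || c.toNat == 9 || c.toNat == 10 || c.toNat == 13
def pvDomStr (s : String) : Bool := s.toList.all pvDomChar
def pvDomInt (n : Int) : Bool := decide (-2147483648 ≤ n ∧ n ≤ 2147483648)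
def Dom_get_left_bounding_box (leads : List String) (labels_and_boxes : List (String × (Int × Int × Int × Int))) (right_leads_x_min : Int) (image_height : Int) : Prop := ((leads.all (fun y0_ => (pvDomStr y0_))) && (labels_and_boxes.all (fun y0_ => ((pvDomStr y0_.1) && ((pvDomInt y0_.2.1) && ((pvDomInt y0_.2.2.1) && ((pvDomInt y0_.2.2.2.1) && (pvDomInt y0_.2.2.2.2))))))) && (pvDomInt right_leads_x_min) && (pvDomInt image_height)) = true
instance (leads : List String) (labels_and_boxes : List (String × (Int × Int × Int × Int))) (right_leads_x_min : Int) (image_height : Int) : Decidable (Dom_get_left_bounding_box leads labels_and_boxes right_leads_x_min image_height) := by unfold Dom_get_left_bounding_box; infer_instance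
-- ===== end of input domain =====

-- ===== PORT A =====
-- Port of A: build the filtered box list, then separate min/min/max scans and len.
def get_left_bounding_box (leads : List String) (labels_and_boxes : List (String × (Int × Int × Int × Int))) (right_leads_x_min : Int) (image_height : Int) : Option ((Int × Int × Int × Int) × Int) :=
  let selected_boxes := labels_and_boxes.filterMap (fun lb => if leads.contains lb.1 then some lb.2 else none)
  match selected_boxes with
  | [] => none
  | b :: bs =>
    let x_min := (bs.map (fun bb => bb.1)).foldl min b.1
    let y_min := max ((bs.map (fun bb => bb.2.1)).foldl min b.2.1 - 110) 0
    let x_max := right_leads_x_min - 10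
    let y_max := min ((bs.map (fun bb => bb.2.2.2)).foldl max b.2.2.2 + 250) image_height
    some ((x_min, y_min, x_max, y_max), (bs.length : Int) + 1)

-- ===== PORT B =====
-- Port of B: one fused pass keeping running extrema and a count (None sentinel = Option).
def glbbStep (leads : List String) (acc : Option (Int × Int × Int) × Int) (lb : String × (Int × Int × Int × Int)) : Option (Int × Int × Int) × Int :=
  if leads.contains lb.1 then
    match acc.1 with
    | none => (some (lb.2.1, lb.2.2.1, lb.2.2.2.2), acc.2 + 1)
    | some (x, y1, y3) => (some (min x lb.2.1, min y1 lb.2.2.1, max y3 lb.2.2.2.2), acc.2 + 1)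
  else acc

def get_left_bounding_box_alt (leads : List String) (labels_and_boxes : List (String × (Int × Int × Int × Int))) (right_leads_x_min : Int) (image_height : Int) : Option ((Int × Int × Int × Int) × Int) :=
  let st := labels_and_boxes.foldl (glbbStep leads) (none, 0)
  match st.1 with
  | none => none
  | some (x_min, min_y1, max_y3) =>
    some ((x_min, max (min_y1 - 110) 0, right_leads_x_min - 10, min (max_y3 + 250) image_height), st.2)

-- ===== PRECONDITION & SPEC =====
def Spec_get_left_bounding_box (leads : List String) (labels_and_boxes : List (String × (Int × Int × Int × Int))) (right_leads_x_min : Int) (image_height : Int) (out : Option ((Int × Int × Int × Int) × Int)) : Prop := out = get_left_bounding_box_alt leads labels_and_boxes right_leads_x_min image_height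
instance (leads : List String) (labels_and_boxes : List (String × (Int × Int × Int × Int))) (right_leads_x_min : Int) (image_height : Int) (out : Option ((Int × Int × Int × Int) × Int)) : Decidable (Spec_get_left_bounding_box leads labels_and_boxes right_leads_x_min image_height out) := by unfold Spec_get_left_bounding_box; infer_instance

-- ===== CLAIM (what is proved, stated in full; the proofs are below) =====
def Claim_equal_get_left_bounding_box : Prop := ∀ (leads : List String) (labels_and_boxes : List (String × (Int × Int × Int × Int))) (right_leads_x_min : Int) (image_height : Int), Dom_get_left_bounding_box leads labels_and_boxes right_leads_x_min image_height → Spec_get_left_bounding_box leads labels_and_boxes right_leads_x_min image_height (get_left_bounding_box leads labels_and_boxes right_leads_x_min image_height)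

-- ===== LEMMAS AND PROOFS =====
lemma glbb_main (leads : List String) (t : List (String × (Int × Int × Int × Int))) :
    ∀ (x y z n : Int),
    t.foldl (glbbStep leads) (some (x, y, z), n) =
      (some (((t.filterMap (fun lb => if leads.contains lb.1 then some lb.2 else none)).map (fun bb => bb.1)).foldl min x,
             ((t.filterMap (fun lb => if leads.contains lb.1 then some lb.2 else none)).map (fun bb => bb.2.1)).foldl min y,
             ((t.filterMap (fun lb => if leads.contains lb.1 then some lb.2 else none)).map (fun bb => bb.2.2.2)).foldl max z),
       n + ((t.filterMap (fun lb => if leads.contains lb.1 then some lb.2 else none)).length : Int)) := by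
  induction t with
  | nil => intro x y z n; simp [List.filterMap]
  | cons hd tl ih =>
    intro x y z n
    by_cases h : hd.1 ∈ leads
    · simp [List.foldl_cons, glbbStep, h, List.filterMap_cons, ih]
      omega
    · simp [List.foldl_cons, glbbStep, h, List.filterMap_cons, ih]

lemma glbb_run (leads : List String) (labs : List (String × (Int × Int × Int × Int))) :
    labs.foldl (glbbStep leads) (none, 0) =
      (match labs.filterMap (fun lb => if leads.contains lb.1 then some lb.2 else none) with
       | [] => ((none : Option (Int × Int × Int)), (0 : Int))
       | b :: bs => (some ((bs.map (fun bb => bb.1)).foldl min b.1,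
                           (bs.map (fun bb => bb.2.1)).foldl min b.2.1,
                           (bs.map (fun bb => bb.2.2.2)).foldl max b.2.2.2),
                     (bs.length : Int) + 1)) := by
  induction labs with
  | nil => simp [List.filterMap]
  | cons hd tl ih =>
    by_cases h : hd.1 ∈ leads
    · simp [List.foldl_cons, glbbStep, h, List.filterMap_cons, glbb_main]
      omega
    · simpa [List.foldl_cons, glbbStep, h, List.filterMap_cons] using ih

-- ===== VERDICT (by name: the statement is the Claim_ definition above) =====
theorem get_left_bounding_box_spec : Claim_equal_get_left_bounding_box := by
  intro leads labs rx ih _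
  unfold Spec_get_left_bounding_box get_left_bounding_box get_left_bounding_box_alt
  rw [glbb_run]
  cases labs.filterMap (fun lb => if leads.contains lb.1 then some lb.2 else none) with
  | nil => rfl
  | cons b bs => rfl
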